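-- pv_equiv track=rewrite | github.com/wkweigel/DELTAexplorer | DELTAexplorer.py | Prune_Syntax
-- ===== SOURCE A (Python) =====
-- def Prune_Syntax(list):
--     '''
--     Removes all syntactical characters from a list of DELTA nodes.
--     '''
--     prune_characters = ['!', '(', ')','-']
--     pruned_list=[]
--     for item in list:
--         for char in prune_characters:
--             item=item.replace(char, '')
--         pruned_list.append(item)
--     return(pruned_list)
-- ===== SOURCE B (Python) =====
-- def Prune_Syntax(list):
--     '''
--     Removes all syntactical characters from a list of DELTA nodes.
--     '''
--     removal_set = {'!', '(', ')', '-'}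
--     return [''.join(ch for ch in item if ch not in removal_set) for item in list]
-- ===== Notes on version B (the rewrite author's own statement) =====
-- stated objective: simpler
-- what changed: Replaces A's four sequential str.replace passes (an outer loop over the character set, each scanning and rebuilding the string) with one comprehension that rebuilds each string in a single character-by-character filtering pass against a removal set.
import Mathlib
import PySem

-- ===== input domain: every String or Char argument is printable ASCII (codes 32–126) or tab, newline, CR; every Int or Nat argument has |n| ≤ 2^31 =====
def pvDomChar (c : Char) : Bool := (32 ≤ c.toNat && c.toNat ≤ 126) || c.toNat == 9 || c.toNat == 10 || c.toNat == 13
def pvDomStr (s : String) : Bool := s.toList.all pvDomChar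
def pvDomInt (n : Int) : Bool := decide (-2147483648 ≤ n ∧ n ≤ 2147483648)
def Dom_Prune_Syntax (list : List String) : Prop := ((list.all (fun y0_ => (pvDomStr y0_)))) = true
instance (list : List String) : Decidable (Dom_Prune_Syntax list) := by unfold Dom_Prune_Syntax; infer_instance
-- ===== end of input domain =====

-- B rebuilds each string in a single character-filtering pass against a removal set,
-- instead of A's four sequential str.replace passes; same return value, simpler.


-- ===== PORT A =====
-- for item in list: for char in prune_characters: item = item.replace(char, ''); pruned_list.append(item)
def Prune_Syntax (list : List String) : List String :=
  let prune_characters : List Char := ['!', '(', ')', '-']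
  let pruned_list : List String :=
    list.foldl (fun pruned_list item =>
      pruned_list ++ [prune_characters.foldl
        (fun item char => PySem.Str.replace item (String.ofList [char]) "") item]) []
  pruned_list

-- ===== PORT B =====
-- [''.join(ch for ch in item if ch not in removal_set) for item in list]
def Prune_Syntax_alt (list : List String) : List String :=
  let removal_set : PySem.Set Char := PySem.Set.ofList ['!', '(', ')', '-']
  list.map (fun item =>
    String.ofList (item.toList.filter (fun ch => !(removal_set.contains ch))))

-- ===== PRECONDITION & SPEC =====
def Spec_Prune_Syntax (list : List String) (out : List String) : Prop := out = Prune_Syntax_alt list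
instance (list : List String) (out : List String) : Decidable (Spec_Prune_Syntax list out) := by unfold Spec_Prune_Syntax; infer_instance

-- ===== CLAIM (what is proved, stated in full; the proofs are below) =====
def Claim_equal_Prune_Syntax : Prop := ∀ (list : List String), Dom_Prune_Syntax list → Spec_Prune_Syntax list (Prune_Syntax list)

-- ===== LEMMAS AND PROOFS =====

-- replace.go with a single-character pattern and empty replacement is a filter
theorem replace_go_single (c : Char) :
    ∀ (l : List Char) (fuel : Nat) (acc : List Char), l.length ≤ fuel →
      PySem.Chars.replace.go [c] [] fuel l acc = acc.reverse ++ l.filter (fun x => x != c) := by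
  intro l
  induction l with
  | nil =>
    intro fuel acc _
    cases fuel <;> simp [PySem.Chars.replace.go]
  | cons c' t ih =>
    intro fuel acc hle
    cases fuel with
    | zero => simp at hle
    | succ f =>
      by_cases h : c = c'
      · subst h
        have hpre : List.isPrefixOf [c] (c :: t) = true := by simp [List.isPrefixOf]
        rw [PySem.Chars.replace.go, if_pos hpre]
        simp only [List.length_cons] at hle
        simp only [List.length_cons, List.length_nil, List.drop_succ_cons, List.drop_zero,
          List.reverse_nil, List.nil_append]
        rw [ih f acc (by omega)]
        simp
      · have hpre : List.isPrefixOf [c] (c' :: t) = false := by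
          simp [List.isPrefixOf]; exact fun hh => h hh
        rw [PySem.Chars.replace.go, if_neg (by simp [hpre])]
        simp only [List.length_cons] at hle
        rw [ih f (c' :: acc) (by omega)]
        have : (c' != c) = true := by simp [bne]; exact fun hh => h hh.symm
        simp [List.filter, this]

theorem replace_single (c : Char) (s : List Char) :
    PySem.Chars.replace s [c] [] = s.filter (fun x => x != c) := by
  rw [PySem.Chars.replace]
  simp only [List.isEmpty_cons]
  exact replace_go_single c s s.length [] (le_refl _)

theorem str_replace_single (c : Char) (s : String) :
    (PySem.Str.replace s (String.ofList [c]) "").toList = s.toList.filter (fun x => x != c) := by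
  rw [PySem.Str.toList_replace]
  simpa using replace_single c s.toList

-- A's four replace passes on one string equal B's single filtering pass
theorem item_eq (s : String) :
    (['!', '(', ')', '-'].foldl (fun item char => PySem.Str.replace item (String.ofList [char]) "") s)
      = String.ofList (s.toList.filter (fun ch =>
          !((PySem.Set.ofList ['!', '(', ')', '-'] : PySem.Set Char).contains ch))) := by
  rw [← String.ofList_toList (s := List.foldl _ _ _)]
  simp only [List.foldl_cons, List.foldl_nil]
  have hset : (PySem.Set.ofList ['!', '(', ')', '-'] : PySem.Set Char) = ['!', '(', ')', '-'] := by
    decide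
  rw [str_replace_single, str_replace_single, str_replace_single, str_replace_single]
  rw [List.filter_filter, List.filter_filter, List.filter_filter]
  congr 1
  apply List.filter_congr
  intro ch _
  rw [hset]
  simp only [bne]
  by_cases h1 : ch = '!' <;> by_cases h2 : ch = '(' <;> by_cases h3 : ch = ')' <;>
    by_cases h4 : ch = '-' <;> simp_all

theorem foldl_append_map {α β : Type} (f : α → β) (l : List α) :
    ∀ (acc : List β), l.foldl (fun r x => r ++ [f x]) acc = acc ++ l.map f := by
  induction l with
  | nil => simp
  | cons x t ih => intro acc; simp [ih]

-- ===== VERDICT (by name: the statement is the Claim_ definition above) =====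
theorem Prune_Syntax_spec : Claim_equal_Prune_Syntax := by
  intro list _
  show Prune_Syntax list = Prune_Syntax_alt list
  rw [Prune_Syntax, Prune_Syntax_alt, foldl_append_map]
  simp only [List.nil_append]
  exact List.map_congr_left (fun item _ => item_eq item)
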